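-- pv_equiv track=rewrite | github.com/facebookresearch/veripy | verilog_generator.py | beautify_io
-- ===== SOURCE A (Python) =====
-- def beautify_io(io_list):
--     direction, typedef, width, name = [], [], [], []
--     new_io_list = []
--     for io in io_list:
--         d = t = w = n = ""
--         content = io.split()
--         if len(content) == 2:
--             d, n = content
--         elif len(content) == 3:
--             d, t, n = content
--         elif len(content) == 4:
--             d, t, w, n = content
--         direction.append(d)
--         typedef.append(t)
--         width.append(w)
--         name.append(n)
--
--     idx_list = sorted(range(len(name)), key=lambda x : name[x])
--
--     max_direction = max(direction, key=len)
--     max_typedef = max(typedef, key=len)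
--     max_width = max(width, key=len)
--
--     for i in idx_list:
--         io = direction[i] + " " * (len(max_direction) - len(direction[i]))\
--             + " " + typedef[i] + " " * (len(max_typedef) - len(typedef[i]))\
--             + " " + width[i] + " " * (len(max_width) - len(width[i]))\
--             + " " + name[i]
--
--         new_io_list.append(io)
--
--     return new_io_list
-- ===== SOURCE B (Python) =====
-- def _insert(recs, r):
--     # keep recs sorted by name; insert before the first strictly-greater name (stable)
--     for i, s in enumerate(recs):
--         if r[3] < s[3]:
--             recs.insert(i, r)
--             return
--     recs.append(r)
--
-- def beautify_io(io_list):
--     recs = []              # always sorted by name (online insertion sort)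
--     wd = wt = ww = 0       # running column widths
--     for io in io_list:
--         f = io.split()
--         if 2 <= len(f) <= 4:
--             mid = f[1:-1] + ["", ""]
--             r = (f[0], mid[0], mid[1], f[-1])
--         else:
--             r = ("", "", "", "")
--         wd = max(wd, len(r[0]))
--         wt = max(wt, len(r[1]))
--         ww = max(ww, len(r[2]))
--         _insert(recs, r)
--     return ["%-*s %-*s %-*s %s" % (wd, d, wt, t, ww, w, n) for d, t, w, n in recs]
-- ===== Notes on version B (the rewrite author's own statement) =====
-- stated objective: alternative
-- what changed: Replaces A's staged pipeline (four parallel field lists, an argsort of range(n) by name, max-by-length elements, then an index-driven formatting loop) by a single online pass that keeps one list of records sorted by name via stable insertion sort and maintains running integer column widths, followed by one %-*s formatting comprehension; parsing uses a bounds check with slice padding instead of the len==2/3/4 elif chain.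
-- outside the precondition, e.g. on beautify_io([]): A raises ValueError, B returns []
import Mathlib
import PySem

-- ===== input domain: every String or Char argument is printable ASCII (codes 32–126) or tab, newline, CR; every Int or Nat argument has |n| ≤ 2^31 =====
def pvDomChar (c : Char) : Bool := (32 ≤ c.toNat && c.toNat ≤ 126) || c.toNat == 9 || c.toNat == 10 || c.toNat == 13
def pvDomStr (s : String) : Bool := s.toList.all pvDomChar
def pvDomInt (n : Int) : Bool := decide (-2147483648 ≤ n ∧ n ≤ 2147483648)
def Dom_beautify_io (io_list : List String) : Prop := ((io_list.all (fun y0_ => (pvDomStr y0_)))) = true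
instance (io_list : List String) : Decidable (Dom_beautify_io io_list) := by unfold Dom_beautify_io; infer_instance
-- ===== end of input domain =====

-- B replaces A's staged pipeline (four parallel lists, an index argsort by name, max-by-length
-- elements, an index-driven formatting loop) by one online pass keeping a single record list
-- sorted by name via insertion sort while maintaining running integer column widths
-- (objective: alternative); return values agree on every non-empty io_list.

-- ===== PORT A =====
-- A: parallel lists built in one loop, an index list sorted by name[x],
-- max elements by len, then a second loop appending padded lines.
-- String concatenation/"*" are ported on code-point lists (String.ofList of toList ++ pyRepeat),
-- exact for Python's str + and str * int.
def beautify_io (io_list : List String) : List String :=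
  let st := io_list.foldl (fun (acc : List String × List String × List String × List String) io =>
      let content := PySem.Str.split₀ io
      let dtwn : String × String × String × String :=
        match content with
        | [d, n] => (d, "", "", n)
        | [d, t, n] => (d, t, "", n)
        | [d, t, w, n] => (d, t, w, n)
        | _ => ("", "", "", "")
      (acc.1 ++ [dtwn.1], acc.2.1 ++ [dtwn.2.1], acc.2.2.1 ++ [dtwn.2.2.1], acc.2.2.2 ++ [dtwn.2.2.2]))
    ([], [], [], [])
  let direction := st.1
  let typedef := st.2.1
  let width := st.2.2.1
  let name := st.2.2.2
  let idx_list := PySem.List.sorted (PySem.List.pyRange 0 (PySem.List.len name)) (fun x => PySem.List.pyGetD name x "") false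
  -- max(xs, key=len) raises ValueError on empty xs: none is excluded by Pre_; .getD "" is unreachable there
  let max_direction := (PySem.List.max? direction (fun s => PySem.Str.len s)).getD ""
  let max_typedef := (PySem.List.max? typedef (fun s => PySem.Str.len s)).getD ""
  let max_width := (PySem.List.max? width (fun s => PySem.Str.len s)).getD ""
  idx_list.foldl (fun new_io_list i =>
    new_io_list ++ [String.ofList (
      (PySem.List.pyGetD direction i "").toList
      ++ PySem.List.pyRepeat [' '] (PySem.Str.len max_direction - PySem.Str.len (PySem.List.pyGetD direction i ""))
      ++ [' '] ++ (PySem.List.pyGetD typedef i "").toList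
      ++ PySem.List.pyRepeat [' '] (PySem.Str.len max_typedef - PySem.Str.len (PySem.List.pyGetD typedef i ""))
      ++ [' '] ++ (PySem.List.pyGetD width i "").toList
      ++ PySem.List.pyRepeat [' '] (PySem.Str.len max_width - PySem.Str.len (PySem.List.pyGetD width i ""))
      ++ [' '] ++ (PySem.List.pyGetD name i "").toList)]) []

-- ===== PORT B =====
-- B: one pass; each io is parsed (bounds check + slice padding), running maxima of the
-- three field lengths are kept, and the record is inserted into an always-sorted list
-- (before the first strictly larger name = stable); then one formatting comprehension.
def pvParseB (io : String) : String × String × String × String :=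
  let f := PySem.Str.split₀ io
  if 2 ≤ f.length ∧ f.length ≤ 4 then
    -- mid = f[1:-1] + ["", ""]; mid[0]/mid[1]/f[-1] are always in range, so pyGetD's default is unreachable
    let mid := PySem.List.slice f (some 1) (some (-1)) ++ ["", ""]
    (PySem.List.pyGetD f 0 "", PySem.List.pyGetD mid 0 "", PySem.List.pyGetD mid 1 "",
     PySem.List.pyGetD f (-1) "")
  else ("", "", "", "")

-- the enumerate-scan of _insert: walk the sorted list, insert before the first strictly-greater name
def pvInsert (recs : List (String × String × String × String))
    (r : String × String × String × String) : List (String × String × String × String) :=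
  match recs with
  | [] => [r]
  | s :: rest => if r.2.2.2 < s.2.2.2 then r :: s :: rest else s :: pvInsert rest r

-- s.ljust-style padding used by "%-*s" (exact for Python's %-*s with a space pad)
def pvLjust (s : String) (w : Int) : List Char :=
  s.toList ++ List.replicate (w - PySem.Str.len s).toNat ' '

def beautify_io_alt (io_list : List String) : List String :=
  let st := io_list.foldl
    (fun (acc : List (String × String × String × String) × Int × Int × Int) io =>
      let r := pvParseB io
      (pvInsert acc.1 r,
       max acc.2.1 (PySem.Str.len r.1),
       max acc.2.2.1 (PySem.Str.len r.2.1),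
       max acc.2.2.2 (PySem.Str.len r.2.2.1)))
    ([], 0, 0, 0)
  st.1.map (fun r => String.ofList (
    pvLjust r.1 st.2.1 ++ [' '] ++ pvLjust r.2.1 st.2.2.1 ++ [' ']
    ++ pvLjust r.2.2.1 st.2.2.2 ++ [' '] ++ r.2.2.2.toList))

-- ===== PRECONDITION & SPEC =====
-- On io_list = [] the Python A raises ValueError (max() of an empty sequence), so [] is excluded.
def Pre_beautify_io (io_list : List String) : Prop := io_list ≠ []
instance (io_list : List String) : Decidable (Pre_beautify_io io_list) := by unfold Pre_beautify_io; infer_instance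
def pvWitness_beautify_io : List String := ["output [3:0] b", "input a"]

def Spec_beautify_io (io_list : List String) (out : List String) : Prop := out = beautify_io_alt io_list
instance (io_list : List String) (out : List String) : Decidable (Spec_beautify_io io_list out) := by unfold Spec_beautify_io; infer_instance

-- ===== CLAIM (what is proved, stated in full; the proofs are below) =====
def Claim_equal_beautify_io : Prop := ∀ (io_list : List String), Dom_beautify_io io_list → Pre_beautify_io io_list → Spec_beautify_io io_list (beautify_io io_list)

-- ===== LEMMAS AND PROOFS =====

-- A's inline len==2/3/4 destructuring equals B's bounds-check-and-slice parse.
theorem pvParse_eq (io : String) :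
    (match PySem.Str.split₀ io with
      | [d, n] => (d, "", "", n)
      | [d, t, n] => (d, t, "", n)
      | [d, t, w, n] => (d, t, w, n)
      | _ => ("", "", "", "")) = pvParseB io := by
  unfold pvParseB
  rcases h : PySem.Str.split₀ io with _ | ⟨a, _ | ⟨b, _ | ⟨c, _ | ⟨d, _ | ⟨e, t⟩⟩⟩⟩⟩ <;>
    simp [PySem.List.pyGetD, PySem.List.pyGet?, PySem.List.pyIdx?,
      PySem.List.slice, PySem.List.clampIdx]

theorem pvFoldA_eq (l : List String) (a b c d : List String) :
    (l.foldl (fun (acc : List String × List String × List String × List String) io =>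
      let content := PySem.Str.split₀ io
      let dtwn : String × String × String × String :=
        match content with
        | [d, n] => (d, "", "", n)
        | [d, t, n] => (d, t, "", n)
        | [d, t, w, n] => (d, t, w, n)
        | _ => ("", "", "", "")
      (acc.1 ++ [dtwn.1], acc.2.1 ++ [dtwn.2.1], acc.2.2.1 ++ [dtwn.2.2.1], acc.2.2.2 ++ [dtwn.2.2.2]))
      (a, b, c, d))
    = (a ++ (l.map pvParseB).map (·.1), b ++ (l.map pvParseB).map (·.2.1),
       c ++ (l.map pvParseB).map (·.2.2.1), d ++ (l.map pvParseB).map (·.2.2.2)) := by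
  induction l generalizing a b c d with
  | nil => simp
  | cons x xs ih => simp [List.foldl_cons, ih, pvParse_eq x]

-- B's scan-and-insert is insertBy with the strict name order (the sorted() insertion step).
theorem pvInsert_eq (ys : List (String × String × String × String))
    (r : String × String × String × String) :
    pvInsert ys r
    = PySem.List.insertBy (fun a b => decide (a.2.2.2 < b.2.2.2)) r ys := by
  induction ys with
  | nil => simp [pvInsert, PySem.List.insertBy]
  | cons y ys ih => simp only [pvInsert, PySem.List.insertBy, ih, decide_eq_true_eq]

-- B's combined fold splits into its four independent components.
theorem pvFoldB_eq (l : List String)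
    (recs : List (String × String × String × String)) (wd wt ww : Int) :
    (l.foldl
      (fun (acc : List (String × String × String × String) × Int × Int × Int) io =>
        let r := pvParseB io
        (pvInsert acc.1 r,
         max acc.2.1 (PySem.Str.len r.1),
         max acc.2.2.1 (PySem.Str.len r.2.1),
         max acc.2.2.2 (PySem.Str.len r.2.2.1)))
      (recs, wd, wt, ww))
    = ((l.map pvParseB).foldl (fun acc r => pvInsert acc r) recs,
       (l.map pvParseB).foldl (fun m r => max m (PySem.Str.len r.1)) wd,
       (l.map pvParseB).foldl (fun m r => max m (PySem.Str.len r.2.1)) wt,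
       (l.map pvParseB).foldl (fun m r => max m (PySem.Str.len r.2.2.1)) ww) := by
  induction l generalizing recs wd wt ww with
  | nil => simp
  | cons x xs ih =>
    simp only [List.foldl_cons, List.map_cons]
    exact ih _ _ _ _

theorem pvMap_insertBy {α β : Type} (f : α → β) (q : β → β → Bool) (x : α) (ys : List α) :
    (PySem.List.insertBy (fun a b => q (f a) (f b)) x ys).map f
    = PySem.List.insertBy q (f x) (ys.map f) := by
  induction ys with
  | nil => simp [PySem.List.insertBy]
  | cons y ys ih =>
    simp only [PySem.List.insertBy, List.map_cons]
    split_ifs with h <;> simp [ih]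

theorem pvMap_sorted {α β κ : Type} [LT κ] [DecidableLT κ] (f : α → β) (key : β → κ)
    (ixs : List α) :
    (PySem.List.sorted ixs (fun i => key (f i)) false).map f
    = PySem.List.sorted (ixs.map f) key false := by
  rw [PySem.List.sorted_eq_foldl_insertBy, PySem.List.sorted_eq_foldl_insertBy]
  suffices h : ∀ acc : List α,
      (ixs.foldl (fun acc x => PySem.List.insertBy (fun a b => decide (key (f a) < key (f b))) x acc) acc).map f
      = (ixs.map f).foldl (fun acc x => PySem.List.insertBy (fun a b => decide (key a < key b)) x acc) (acc.map f) by
    simpa using h []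
  induction ixs with
  | nil => simp
  | cons x xs ih =>
    intro acc
    simp only [List.foldl_cons, List.map_cons, ih]
    rw [pvMap_insertBy f (fun a b => decide (key a < key b)) x acc]

theorem pvMax?_map {α κ : Type} [LT κ] [DecidableLT κ] (f : α → κ) (xs : List α) :
    PySem.List.max? (xs.map f) (fun x => x) = (PySem.List.max? xs f).map f := by
  unfold PySem.List.max?
  suffices h : ∀ acc : Option α,
      (xs.map f).foldl (fun acc x => match acc with
        | none => some x
        | some m => if m < x then some x else some m) (acc.map f)
      = (xs.foldl (fun acc x => match acc with
        | none => some x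
        | some m => if f m < f x then some x else some m) acc).map f by
    simpa using h none
  induction xs with
  | nil => simp
  | cons x xs ih =>
    intro acc
    cases acc with
    | none => simpa using ih (some x)
    | some m =>
      by_cases h : f m < f x
      · simpa [h] using ih (some x)
      · simpa [h] using ih (some m)

theorem pvMaxLen_eq (xs : List String) :
    PySem.Str.len ((PySem.List.max? xs (fun s => PySem.Str.len s)).getD "")
    = (PySem.List.max? (xs.map (fun s => PySem.Str.len s)) (fun x => x)).getD 0 := by
  rw [pvMax?_map]
  cases h : PySem.List.max? xs (fun s => PySem.Str.len s) with
  | none => simp [PySem.Str.len]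
  | some m => simp

-- B's running width over a projection equals A's max-by-len element's length (nonempty list).
theorem pvWidth_eq (recs : List (String × String × String × String))
    (g : (String × String × String × String) → String) (h : recs ≠ []) :
    recs.foldl (fun m r => max m (PySem.Str.len (g r))) 0
    = PySem.Str.len ((PySem.List.max? (recs.map g) (fun s => PySem.Str.len s)).getD "") := by
  rw [pvMaxLen_eq, List.map_map]
  have hfold : recs.foldl (fun m r => max m (PySem.Str.len (g r))) 0
      = (recs.map (fun r => PySem.Str.len (g r))).foldl max 0 := by
    rw [List.foldl_map]
  rw [hfold]
  cases hr : recs with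
  | nil => exact absurd hr h
  | cons x t =>
    have hcomp : (PySem.Str.len ∘ g) = fun r => PySem.Str.len (g r) := rfl
    rw [hcomp]
    simp only [List.map_cons, List.foldl_cons, PySem.List.max?_id_cons, Option.getD_some]
    have h0 : (0 : Int) ⊔ PySem.Str.len (g x) = PySem.Str.len (g x) := by
      have : (0 : Int) ≤ PySem.Str.len (g x) := by
        simp [PySem.Str.len]
      exact max_eq_right this
    rw [h0]

-- ===== VERDICT (by name: the statement is the Claim_ definition above) =====
theorem beautify_io_spec : Claim_equal_beautify_io := by
  intro io_list _ hpre
  unfold Spec_beautify_io beautify_io beautify_io_alt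
  rw [pvFoldA_eq io_list [] [] [] [], pvFoldB_eq io_list [] 0 0 0]
  simp only [List.nil_append]
  have hne : io_list.map pvParseB ≠ [] := by
    simpa using hpre
  rw [PySem.List.foldl_append_singleton_eq_map]
  simp only [List.nil_append]
  have h1 : ∀ i : Int, PySem.List.pyGetD ((io_list.map pvParseB).map (·.1)) i ""
      = (PySem.List.pyGetD (io_list.map pvParseB) i ("", "", "", "")).1 :=
    fun i => PySem.List.pyGetD_map _ _ i ("", "", "", "")
  have h2 : ∀ i : Int, PySem.List.pyGetD ((io_list.map pvParseB).map (·.2.1)) i ""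
      = (PySem.List.pyGetD (io_list.map pvParseB) i ("", "", "", "")).2.1 :=
    fun i => PySem.List.pyGetD_map _ _ i ("", "", "", "")
  have h3 : ∀ i : Int, PySem.List.pyGetD ((io_list.map pvParseB).map (·.2.2.1)) i ""
      = (PySem.List.pyGetD (io_list.map pvParseB) i ("", "", "", "")).2.2.1 :=
    fun i => PySem.List.pyGetD_map _ _ i ("", "", "", "")
  have h4 : ∀ i : Int, PySem.List.pyGetD ((io_list.map pvParseB).map (·.2.2.2)) i ""
      = (PySem.List.pyGetD (io_list.map pvParseB) i ("", "", "", "")).2.2.2 :=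
    fun i => PySem.List.pyGetD_map _ _ i ("", "", "", "")
  have hlen : PySem.List.len ((io_list.map pvParseB).map (·.2.2.2))
      = PySem.List.len (io_list.map pvParseB) := by simp [PySem.List.len]
  simp only [h1, h2, h3, h4, hlen]
  have hins : (io_list.map pvParseB).foldl (fun acc r => pvInsert acc r) []
      = PySem.List.sorted (io_list.map pvParseB)
          (fun r : String × String × String × String => r.2.2.2) false := by
    rw [PySem.List.sorted_eq_foldl_insertBy]
    simp only [pvInsert_eq]
  rw [hins]
  have hsorted := pvMap_sorted (fun i => PySem.List.pyGetD (io_list.map pvParseB) i ("", "", "", ""))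
      (fun r : String × String × String × String => r.2.2.2)
      (PySem.List.pyRange 0 (PySem.List.len (io_list.map pvParseB)))
  rw [PySem.List.map_pyGetD_pyRange_zero (io_list.map pvParseB) ("", "", "", "")] at hsorted
  rw [← hsorted]
  rw [pvWidth_eq _ (·.1) hne, pvWidth_eq _ (·.2.1) hne, pvWidth_eq _ (·.2.2.1) hne]
  simp only [List.map_map]
  apply List.map_congr_left
  intro i _
  simp only [Function.comp_apply, Function.comp_def]
  simp [pvLjust, PySem.List.pyRepeat_singleton]
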